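-- pv_equiv track=rewrite | github.com/Tanisha-Selva/NEUROLEARN | adaptive.py | analyze_attempt_trend
-- ===== SOURCE A (Python) =====
-- from typing import List, Dict, Any
--
-- def analyze_attempt_trend(attempts: List[Dict[str, Any]]) -> Dict[str, Any]:
--     """
--     Implements the core hackathon constraint:
--     Track last 3 attempts.
--     If improving → increase difficulty
--     If declining → decrease difficulty
--     Else → maintain
--     """
--     # Grab at most the last 3 attempts, chronologically ordered
--     recent = attempts[-3:] if len(attempts) >= 3 else attempts
--
--     if len(recent) < 2:
--         return {
--             "difficulty_flow": "maintain",
--             "trend_summary": "Not enough attempts to calculate a strict trend. Keep current level."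
--         }
--
--     scores = [a.get("overall_score", 0) for a in recent]
--
--     # Check if strictly improving (each score is >= previous and at least one is >)
--     is_improving = all(scores[i] <= scores[i+1] for i in range(len(scores)-1)) and scores[0] < scores[-1]
--
--     # Check if strictly declining
--     is_declining = all(scores[i] >= scores[i+1] for i in range(len(scores)-1)) and scores[0] > scores[-1]
--
--     if is_improving:
--         flow = "increase difficulty"
--         summary = f"Scores improved across recent attempts ({scores}). Ready for a harder challenge."
--     elif is_declining:
--         flow = "decrease difficulty"
--         summary = f"Scores declined across recent attempts ({scores}). Stepping back to reinforce basics."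
--     else:
--         flow = "maintain"
--         summary = f"Scores are fluctuating or stagnant ({scores}). Maintaining current difficulty."
--
--     return {
--         "difficulty_flow": flow,
--         "trend_summary": summary
--     }
-- ===== SOURCE B (Python) =====
-- from typing import List, Dict, Any
--
-- def analyze_attempt_trend(attempts: List[Dict[str, Any]]) -> Dict[str, Any]:
--     # Last 3 attempts (slicing already returns the whole list when shorter).
--     recent = attempts[-3:]
--
--     if len(recent) < 2:
--         return {
--             "difficulty_flow": "maintain",
--             "trend_summary": "Not enough attempts to calculate a strict trend. Keep current level."
--         }
--
--     scores = [a.get("overall_score", 0) for a in recent]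
--
--     # Sort once; non-decreasing == already sorted, non-increasing == reverse of it.
--     s = sorted(scores)
--     if scores == s and scores[0] < scores[-1]:
--         flow = "increase difficulty"
--         summary = f"Scores improved across recent attempts ({scores}). Ready for a harder challenge."
--     elif scores == s[::-1] and scores[0] > scores[-1]:
--         flow = "decrease difficulty"
--         summary = f"Scores declined across recent attempts ({scores}). Stepping back to reinforce basics."
--     else:
--         flow = "maintain"
--         summary = f"Scores are fluctuating or stagnant ({scores}). Maintaining current difficulty."
--
--     return {
--         "difficulty_flow": flow,
--         "trend_summary": summary
--     }
-- ===== Notes on version B (the rewrite author's own statement) =====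
-- stated objective: idiomatic
-- what changed: Replaces the two index-based all() scans over adjacent pairs with a single sort: non-decreasing iff scores == sorted(scores), non-increasing iff scores == sorted(scores)[::-1]; the redundant len>=3 guard before the slice is dropped.
import Mathlib
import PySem

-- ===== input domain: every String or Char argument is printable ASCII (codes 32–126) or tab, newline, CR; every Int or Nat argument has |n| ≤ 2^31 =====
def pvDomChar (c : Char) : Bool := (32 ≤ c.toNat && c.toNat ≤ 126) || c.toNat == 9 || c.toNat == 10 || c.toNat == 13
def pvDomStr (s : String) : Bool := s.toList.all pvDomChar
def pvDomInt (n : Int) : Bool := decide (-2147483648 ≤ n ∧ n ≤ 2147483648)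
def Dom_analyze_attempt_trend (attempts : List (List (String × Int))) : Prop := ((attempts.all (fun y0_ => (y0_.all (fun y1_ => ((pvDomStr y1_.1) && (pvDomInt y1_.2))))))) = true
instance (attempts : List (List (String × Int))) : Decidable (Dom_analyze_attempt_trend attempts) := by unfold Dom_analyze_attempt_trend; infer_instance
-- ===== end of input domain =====

-- B replaces A's two adjacent-pair all() scans by one sort and compares scores with
-- sorted(scores) / its reverse; the redundant len>=3 guard before the slice is dropped.

-- shared helpers: a.get("overall_score", 0) on the association-list dict (first match), and str(list-of-int)
def pvGetScore (a : List (String × Int)) : Int :=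
  ((a.find? (fun kv => kv.1 == "overall_score")).map Prod.snd).getD 0

def pvListRepr (xs : List Int) : String :=
  "[" ++ String.intercalate ", " (xs.map PySem.Int.toStr) ++ "]"

-- ===== PORT A =====
def analyze_attempt_trend (attempts : List (List (String × Int))) : List (String × String) :=
  let recent := if attempts.length ≥ 3 then PySem.List.slice attempts (some (-3)) none else attempts
  if recent.length < 2 then
    [("difficulty_flow", "maintain"),
     ("trend_summary", "Not enough attempts to calculate a strict trend. Keep current level.")]
  else
    let scores := recent.map pvGetScore
    let is_improving :=
      ((PySem.List.pyRange 0 (PySem.List.len scores - 1) 1).all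
        (fun i => decide (PySem.List.pyGetD scores i 0 ≤ PySem.List.pyGetD scores (i + 1) 0)))
      && decide (PySem.List.pyGetD scores 0 0 < PySem.List.pyGetD scores (-1) 0)
    let is_declining :=
      ((PySem.List.pyRange 0 (PySem.List.len scores - 1) 1).all
        (fun i => decide (PySem.List.pyGetD scores i 0 ≥ PySem.List.pyGetD scores (i + 1) 0)))
      && decide (PySem.List.pyGetD scores 0 0 > PySem.List.pyGetD scores (-1) 0)
    let pr :=
      if is_improving then
        ("increase difficulty",
         "Scores improved across recent attempts (" ++ pvListRepr scores ++ "). Ready for a harder challenge.")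
      else if is_declining then
        ("decrease difficulty",
         "Scores declined across recent attempts (" ++ pvListRepr scores ++ "). Stepping back to reinforce basics.")
      else
        ("maintain",
         "Scores are fluctuating or stagnant (" ++ pvListRepr scores ++ "). Maintaining current difficulty.")
    [("difficulty_flow", pr.1), ("trend_summary", pr.2)]

-- ===== PORT B =====
def analyze_attempt_trend_alt (attempts : List (List (String × Int))) : List (String × String) :=
  let recent := PySem.List.slice attempts (some (-3)) none
  if recent.length < 2 then
    [("difficulty_flow", "maintain"),
     ("trend_summary", "Not enough attempts to calculate a strict trend. Keep current level.")]
  else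
    let scores := recent.map pvGetScore
    let s := PySem.List.sorted scores (fun x => x) false
    let pr :=
      if scores = s ∧ PySem.List.pyGetD scores 0 0 < PySem.List.pyGetD scores (-1) 0 then
        ("increase difficulty",
         "Scores improved across recent attempts (" ++ pvListRepr scores ++ "). Ready for a harder challenge.")
      else if scores = (PySem.List.slice? s none none (-1)).getD [] ∧ PySem.List.pyGetD scores 0 0 > PySem.List.pyGetD scores (-1) 0 then
        ("decrease difficulty",
         "Scores declined across recent attempts (" ++ pvListRepr scores ++ "). Stepping back to reinforce basics.")
      else
        ("maintain",
         "Scores are fluctuating or stagnant (" ++ pvListRepr scores ++ "). Maintaining current difficulty.")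
    [("difficulty_flow", pr.1), ("trend_summary", pr.2)]

-- ===== PRECONDITION & SPEC =====
def Spec_analyze_attempt_trend (attempts : List (List (String × Int))) (out : List (String × String)) : Prop := out = analyze_attempt_trend_alt attempts
instance (attempts : List (List (String × Int))) (out : List (String × String)) : Decidable (Spec_analyze_attempt_trend attempts out) := by unfold Spec_analyze_attempt_trend; infer_instance

-- ===== CLAIM (what is proved, stated in full; the proofs are below) =====
def Claim_equal_analyze_attempt_trend : Prop := ∀ (attempts : List (List (String × Int))), Dom_analyze_attempt_trend attempts → Spec_analyze_attempt_trend attempts (analyze_attempt_trend attempts)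

-- ===== LEMMAS AND PROOFS =====

-- scores == sorted(scores)  ↔  the list is (weakly) increasing
theorem pv_sorted_id_eq_iff (xs : List Int) :
    xs = PySem.List.sorted xs (fun x => x) false ↔ xs.Pairwise (· ≤ ·) := by
  constructor
  · intro h
    have := PySem.List.sorted_pairwise xs (fun x => x) (κ := Int)
    rw [← h] at this
    exact this
  · intro h
    exact (PySem.List.sorted_eq_self_of_pairwise xs (fun x => x) h).symm

-- scores == sorted(scores)[::-1]  ↔  the list is (weakly) decreasing
theorem pv_sorted_rev_eq_iff (xs : List Int) :
    xs = (PySem.List.sorted xs (fun x => x) false).reverse ↔ xs.Pairwise (· ≥ ·) := by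
  constructor
  · intro h
    have hp := PySem.List.sorted_pairwise xs (fun x => x) (κ := Int)
    rw [h]
    exact (List.pairwise_reverse).mpr (by simpa using hp)
  · intro h
    have hperm : xs.reverse.Perm xs := List.reverse_perm xs
    have hpair : xs.reverse.Pairwise (fun a b => a ≤ b) := (List.pairwise_reverse).mpr (by simpa using h)
    have := PySem.List.sorted_id_eq_of_perm_of_pairwise xs xs.reverse hperm hpair
    rw [this, List.reverse_reverse]

-- A's all() over adjacent indices is exactly weak monotonicity
theorem pv_scan (xs : List Int) (r : Int → Int → Prop) [DecidableRel r] :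
    ((PySem.List.pyRange 0 (PySem.List.len xs - 1) 1).all
        (fun i => decide (r (PySem.List.pyGetD xs i 0) (PySem.List.pyGetD xs (i + 1) 0)))) = true
      ↔ xs.IsChain r := by
  rw [PySem.List.pyRange_one]
  simp only [PySem.List.len_eq, List.all_map, List.all_eq_true, List.mem_range, Function.comp,
    decide_eq_true_eq, List.isChain_iff_getElem, zero_add]
  have cast1 : ∀ k : Nat, (k : Int) + 1 = ((k + 1 : Nat) : Int) := by intro k; push_cast; ring
  constructor
  · intro h i hi
    have hk := h i (by omega)
    rw [cast1, PySem.List.pyGetD_natCast, PySem.List.pyGetD_natCast,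
        List.getD_eq_getElem _ _ (by omega), List.getD_eq_getElem _ _ (by omega)] at hk
    exact hk
  · intro h k hk
    rw [cast1, PySem.List.pyGetD_natCast, PySem.List.pyGetD_natCast,
        List.getD_eq_getElem _ _ (by omega), List.getD_eq_getElem _ _ (by omega)]
    exact h k (by omega)

theorem pv_scan_le (xs : List Int) :
    ((PySem.List.pyRange 0 (PySem.List.len xs - 1) 1).all
        (fun i => decide (PySem.List.pyGetD xs i 0 ≤ PySem.List.pyGetD xs (i + 1) 0))) = true
      ↔ xs.Pairwise (· ≤ ·) := by
  rw [pv_scan]; exact List.isChain_iff_pairwise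

theorem pv_scan_ge (xs : List Int) :
    ((PySem.List.pyRange 0 (PySem.List.len xs - 1) 1).all
        (fun i => decide (PySem.List.pyGetD xs i 0 ≥ PySem.List.pyGetD xs (i + 1) 0))) = true
      ↔ xs.Pairwise (· ≥ ·) := by
  rw [pv_scan]
  haveI : Trans (α := Int) (· ≥ ·) (· ≥ ·) (· ≥ ·) := ⟨fun h1 h2 => le_trans h2 h1⟩
  exact List.isChain_iff_pairwise

-- the sliced "recent" lists of the two ports coincide
theorem pv_recent_eq (attempts : List (List (String × Int))) :
    (if attempts.length ≥ 3 then PySem.List.slice attempts (some (-3)) none else attempts)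
      = PySem.List.slice attempts (some (-3)) none := by
  by_cases h : attempts.length ≥ 3
  · simp [h]
  · rw [PySem.List.slice_from_neg_ofNat attempts 3 (by omega)]
    have h0 : attempts.length - 3 = 0 := by omega
    rw [h0, List.drop_zero]
    simp

-- ===== VERDICT (by name: the statement is the Claim_ definition above) =====
theorem analyze_attempt_trend_spec : Claim_equal_analyze_attempt_trend := by
  intro attempts _
  unfold Spec_analyze_attempt_trend analyze_attempt_trend analyze_attempt_trend_alt
  rw [pv_recent_eq]
  set recent := PySem.List.slice attempts (some (-3)) none with hrec
  by_cases h2 : recent.length < 2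
  · simp [h2]
  · simp only [if_neg h2, Bool.and_eq_true, decide_eq_true_eq, pv_scan_le, pv_scan_ge,
      pv_sorted_id_eq_iff, pv_sorted_rev_eq_iff,
      PySem.List.slice?_none_none_neg_one, Option.getD_some]
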